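-- pv_equiv track=rewrite | github.com/mangimangi/git-vendored | .pearls/merge-driver.py | apply_specificity
-- ===== SOURCE A (Python) =====
-- from typing import Any, TYPE_CHECKING, cast
--
-- def ref_subsumes(a: dict[str, Any], b: dict[str, Any]) -> bool:
--     """True if reference `a` subsumes `b`.
--
--     A subsumes B when every field in B exists in A with the same value,
--     and A has at least one additional field.
--     """
--     if len(a) <= len(b):
--         return False
--     return all(a.get(k) == v for k, v in b.items())
--
-- def apply_specificity(refs: list[dict[str, Any]]) -> list[dict[str, Any]]:
--     """Remove references that are subsumed by more-specific ones."""
--     result = []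
--     for i, ref in enumerate(refs):
--         subsumed = False
--         for j, other in enumerate(refs):
--             if i != j and ref_subsumes(other, ref):
--                 subsumed = True
--                 break
--         if not subsumed:
--             result.append(ref)
--     return result
-- ===== SOURCE B (Python) =====
-- def _subsumes(a, b):
--     """True if `a` subsumes `b`: a is strictly larger and contains all of b's items."""
--     if len(a) <= len(b):
--         return False
--     return all(a.get(k) == v for k, v in b.items())
--
-- def apply_specificity(refs):
--     """Remove references that are subsumed by more-specific ones.
--
--     Sort (index, ref) pairs by size descending (stable), then make one forward
--     pass: a ref can only be subsumed by one of the strictly larger refs, all of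
--     which were already seen.  Finally emit survivors in original order.
--     """
--     pairs = sorted(enumerate(refs), key=lambda p: -len(p[1]))
--     seen = []
--     keep = set()
--     for i, ref in pairs:
--         if not any(_subsumes(s, ref) for s in seen):
--             keep.add(i)
--         seen.append(ref)
--     return [ref for i, ref in enumerate(refs) if i in keep]
-- ===== Notes on version B (the rewrite author's own statement) =====
-- stated objective: alternative
-- what changed: B sorts (index, ref) pairs by reference size descending once and makes a single forward pass in which each reference is checked only against the already-seen (necessarily not-smaller) references, collecting surviving indices in a set and emitting survivors in original order, instead of A's full inner scan over all references for every reference.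
import Mathlib
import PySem

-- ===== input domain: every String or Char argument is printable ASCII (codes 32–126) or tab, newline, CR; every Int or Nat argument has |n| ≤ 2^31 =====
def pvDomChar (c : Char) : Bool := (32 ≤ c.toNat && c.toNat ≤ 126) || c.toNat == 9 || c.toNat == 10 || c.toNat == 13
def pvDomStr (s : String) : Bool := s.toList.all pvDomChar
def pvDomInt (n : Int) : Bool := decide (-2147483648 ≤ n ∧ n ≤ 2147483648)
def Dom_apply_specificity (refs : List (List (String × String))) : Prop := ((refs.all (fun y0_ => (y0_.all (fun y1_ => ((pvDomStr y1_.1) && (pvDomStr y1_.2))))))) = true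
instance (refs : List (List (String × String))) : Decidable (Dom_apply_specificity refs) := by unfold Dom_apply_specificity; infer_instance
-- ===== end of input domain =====

-- B sorts the references by size once and checks each only against the larger ones already
-- seen in a single forward pass, instead of A's full inner scan per reference ('alternative').

-- ===== PORT A =====
-- ref_subsumes(a, b): shared helper of both Pythons (Source B's _subsumes has the identical body)
def refSubsumes (a b : List (String × String)) : Bool :=
  if a.length ≤ b.length then false
  else b.all (fun kv => PySem.Dict.get? ⟨a⟩ kv.1 == some kv.2)

def apply_specificity (refs : List (List (String × String))) : List (List (String × String)) :=
  (PySem.List.enumerate refs).foldl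
    (fun result p =>
      if (PySem.List.enumerate refs).any (fun q => q.1 != p.1 && refSubsumes q.2 p.2)
      then result
      else result ++ [p.2]) []

-- ===== PORT B =====
def apply_specificity_alt (refs : List (List (String × String))) : List (List (String × String)) :=
  let pairs := PySem.List.sorted (PySem.List.enumerate refs) (fun p => -(p.2.length : Int))
  let st := pairs.foldl
    (fun (st : List (List (String × String)) × PySem.Set Int) p =>
      (st.1 ++ [p.2],
       if st.1.any (fun s => refSubsumes s p.2) then st.2 else PySem.Set.add st.2 p.1))
    ([], PySem.Set.empty)
  (PySem.List.enumerate refs).foldl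
    (fun acc p => if PySem.Set.contains st.2 p.1 then acc ++ [p.2] else acc) []

-- ===== PRECONDITION & SPEC =====
def Spec_apply_specificity (refs : List (List (String × String))) (out : List (List (String × String))) : Prop := out = apply_specificity_alt refs
instance (refs : List (List (String × String))) (out : List (List (String × String))) : Decidable (Spec_apply_specificity refs out) := by unfold Spec_apply_specificity; infer_instance

-- ===== CLAIM (what is proved, stated in full; the proofs are below) =====
def Claim_equal_apply_specificity : Prop := ∀ (refs : List (List (String × String))), Dom_apply_specificity refs → Spec_apply_specificity refs (apply_specificity refs)

-- ===== LEMMAS AND PROOFS =====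

theorem refSubsumes_length {a b : List (String × String)} (h : refSubsumes a b = true) :
    b.length < a.length := by
  unfold refSubsumes at h
  by_cases hl : a.length ≤ b.length
  · rw [if_pos hl] at h; simp at h
  · omega

-- the state of B's forward pass, characterised: which indices end in `keep`
theorem loop_keep (S : List (Int × List (String × String)))
    (seen0 : List (List (String × String))) (keep0 : PySem.Set Int) (i : Int) :
    (i ∈ (S.foldl
      (fun (st : List (List (String × String)) × PySem.Set Int) p =>
        (st.1 ++ [p.2],
         if st.1.any (fun s => refSubsumes s p.2) then st.2 else PySem.Set.add st.2 p.1))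
      (seen0, keep0)).2) ↔
    (i ∈ keep0 ∨ ∃ (k : Nat) (h : k < S.length), S[k].1 = i ∧
      ((seen0 ++ (S.take k).map Prod.snd).any (fun s => refSubsumes s S[k].2)) = false) := by
  induction S generalizing seen0 keep0 with
  | nil => simp
  | cons q T ih =>
    simp only [List.foldl_cons]
    by_cases hc : seen0.any (fun s => refSubsumes s q.2) = true
    · rw [if_pos hc, ih]
      constructor
      · rintro (h0 | ⟨k, hk, h1, h2⟩)
        · exact Or.inl h0
        · exact Or.inr ⟨k+1, by simpa using hk, by simpa using h1, by
            simpa [List.append_assoc] using h2⟩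
      · rintro (h0 | ⟨k, hk, h1, h2⟩)
        · exact Or.inl h0
        · cases k with
          | zero => simp only [List.take_zero, List.map_nil, List.append_nil] at h2; simp only [List.getElem_cons_zero] at h2; rw [hc] at h2; simp at h2
          | succ j => exact Or.inr ⟨j, by simpa using hk, by simpa using h1, by
              simpa [List.append_assoc] using h2⟩
    · rw [if_neg hc, ih]
      rw [PySem.Set.mem_add]
      constructor
      · rintro ((h0 | hq) | ⟨k, hk, h1, h2⟩)
        · exact Or.inl h0
        · exact Or.inr ⟨0, by simp, by simpa using hq.symm, by simpa using hc⟩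
        · exact Or.inr ⟨k+1, by simpa using hk, by simpa using h1, by
            simpa [List.append_assoc] using h2⟩
      · rintro (h0 | ⟨k, hk, h1, h2⟩)
        · exact Or.inl (Or.inl h0)
        · cases k with
          | zero => exact Or.inl (Or.inr (by simpa using h1.symm))
          | succ j => exact Or.inr ⟨j, by simpa using hk, by simpa using h1, by
              simpa [List.append_assoc] using h2⟩

-- the indices in the sorted pairs are pairwise distinct
theorem nodup_fst_sorted (refs : List (List (String × String))) :
    ((PySem.List.sorted (PySem.List.enumerate refs) (fun p => -(p.2.length : Int))).map Prod.fst).Nodup := by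
  have hperm := (PySem.List.sorted_perm (PySem.List.enumerate refs) (fun p => -(p.2.length : Int)) false).map Prod.fst
  rw [List.Perm.nodup_iff hperm]
  have := PySem.List.pairwise_lt_enumerate refs 0
  exact (this.map Prod.fst (by intro a b h; exact h)).imp ne_of_lt

-- the heart: for the element at position k of the sorted list, scanning the prefix of
-- strictly larger references equals A's full scan with the i != j guard
theorem prefix_any_eq (refs : List (List (String × String))) (k : Nat)
    (hk : k < (PySem.List.sorted (PySem.List.enumerate refs) (fun p => -(p.2.length : Int))).length) :
    (((PySem.List.sorted (PySem.List.enumerate refs) (fun p => -(p.2.length : Int))).take k).any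
        (fun q => refSubsumes q.2 ((PySem.List.sorted (PySem.List.enumerate refs) (fun p => -(p.2.length : Int)))[k].2)))
      = (PySem.List.enumerate refs).any (fun q =>
          q.1 != (PySem.List.sorted (PySem.List.enumerate refs) (fun p => -(p.2.length : Int)))[k].1 &&
          refSubsumes q.2 ((PySem.List.sorted (PySem.List.enumerate refs) (fun p => -(p.2.length : Int)))[k].2)) := by
  have hperm : (PySem.List.sorted (PySem.List.enumerate refs) (fun p => -(p.2.length : Int))).Perm (PySem.List.enumerate refs) :=
    PySem.List.sorted_perm (PySem.List.enumerate refs) (fun p => -(p.2.length : Int)) false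
  have hnd := nodup_fst_sorted refs
  apply Bool.eq_iff_iff.mpr
  simp only [List.any_eq_true]
  constructor
  · rintro ⟨q, hq, hsub⟩
    refine ⟨q, hperm.mem_iff.mp (List.mem_of_mem_take hq), ?_⟩
    rw [Bool.and_eq_true]
    refine ⟨?_, hsub⟩
    obtain ⟨m, hm, hqm⟩ := List.mem_iff_getElem.mp hq
    have hmk : m < k := lt_of_lt_of_le hm (by simp [List.length_take])
    rw [(List.getElem_take : (List.take k _)[m] = _)] at hqm
    rw [bne_iff_ne]
    intro he
    have h1 : ((PySem.List.sorted (PySem.List.enumerate refs) (fun p => -(p.2.length : Int))).map Prod.fst)[m]'(by simp; simp [List.length_take] at hm; omega) = ((PySem.List.sorted (PySem.List.enumerate refs) (fun p => -(p.2.length : Int))).map Prod.fst)[k]'(by simpa using hk) := by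
      simp only [List.getElem_map]
      rw [hqm, he]
    have := hnd.getElem_inj_iff.mp h1
    omega
  · rintro ⟨q, hqE, hcond⟩
    rw [Bool.and_eq_true, bne_iff_ne] at hcond
    obtain ⟨hne, hsub⟩ := hcond
    obtain ⟨m, hm, hqm⟩ := List.mem_iff_getElem.mp (hperm.mem_iff.mpr hqE)
    have hlen := refSubsumes_length hsub
    have hmk : m < k := by
      by_contra hge
      have hkm : k ≤ m := by omega
      have := PySem.List.key_sorted_getElem_mono (PySem.List.enumerate refs)
        (fun p => -(p.2.length : Int)) hkm (by simpa using hm)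
      simp only [hqm] at this
      simp at this
      omega
    refine ⟨q, ?_, hsub⟩
    rw [← hqm, ← (List.getElem_take : (List.take k _)[m]'(by simp at hm ⊢; omega) = _)]
    exact List.getElem_mem _

theorem keep_char (refs : List (List (String × String)))
    (p : Int × List (String × String)) (hp : p ∈ PySem.List.enumerate refs) :
    PySem.Set.contains
      ((PySem.List.sorted (PySem.List.enumerate refs) (fun p => -(p.2.length : Int))).foldl
        (fun (st : List (List (String × String)) × PySem.Set Int) p =>
          (st.1 ++ [p.2],
           if st.1.any (fun s => refSubsumes s p.2) then st.2 else PySem.Set.add st.2 p.1))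
        ([], PySem.Set.empty)).2 p.1
    = !((PySem.List.enumerate refs).any (fun q => q.1 != p.1 && refSubsumes q.2 p.2)) := by
  have hperm : (PySem.List.sorted (PySem.List.enumerate refs) (fun p => -(p.2.length : Int))).Perm (PySem.List.enumerate refs) :=
    PySem.List.sorted_perm (PySem.List.enumerate refs) (fun p => -(p.2.length : Int)) false
  have hnd := nodup_fst_sorted refs
  obtain ⟨k0, hk0, hpk0⟩ := List.mem_iff_getElem.mp (hperm.mem_iff.mpr hp)
  apply Bool.eq_iff_iff.mpr
  simp only [Bool.not_eq_true']
  have hcont : ∀ (L : PySem.Set Int) (x : Int), PySem.Set.contains L x = true ↔ x ∈ L := by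
    intro L x; simp [PySem.Set.contains]
  rw [hcont, loop_keep]
  constructor
  · rintro (h0 | ⟨k, hk, h1, h2⟩)
    · simp [PySem.Set.empty] at h0
    · have hkk : k = k0 := by
        have h3 : ((PySem.List.sorted (PySem.List.enumerate refs) (fun p => -(p.2.length : Int))).map Prod.fst)[k]'(by simpa using hk) = ((PySem.List.sorted (PySem.List.enumerate refs) (fun p => -(p.2.length : Int))).map Prod.fst)[k0]'(by simpa using hk0) := by
          simp only [List.getElem_map]
          rw [h1, hpk0]
        exact hnd.getElem_inj_iff.mp h3
      subst hkk
      rw [List.nil_append, List.any_map] at h2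
      have h4 := prefix_any_eq refs k hk
      simp only [Function.comp_def] at h2 h4
      rw [h2] at h4
      rw [hpk0] at h4
      exact h4.symm
  · intro ha
    refine Or.inr ⟨k0, hk0, by rw [hpk0], ?_⟩
    rw [List.nil_append, List.any_map]
    have h4 := prefix_any_eq refs k0 hk0
    simp only [Function.comp_def]
    rw [h4, hpk0]
    exact ha

-- ===== VERDICT (by name: the statement is the Claim_ definition above) =====
theorem apply_specificity_spec : Claim_equal_apply_specificity := by
  intro refs _
  unfold Spec_apply_specificity apply_specificity apply_specificity_alt
  rw [PySem.List.foldl_congr_mem _ _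
    (fun acc p => if !((PySem.List.enumerate refs).any (fun q => q.1 != p.1 && refSubsumes q.2 p.2)) then acc ++ [p.2] else acc) _
    (by intro acc p _; by_cases h : (PySem.List.enumerate refs).any (fun q => q.1 != p.1 && refSubsumes q.2 p.2) = true <;> simp [h])]
  rw [PySem.List.foldl_append_if, PySem.List.foldl_append_if]
  simp only [List.nil_append]
  congr 1
  apply List.filter_congr
  intro p hp
  rw [keep_char refs p hp]
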